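-- pv_equiv track=rewrite | github.com/judithvdw/AOC2023 | 10.py | clean_raw
-- ===== SOURCE A (Python) =====
-- def clean_raw(raw, loop):
--     clean_raw = []
--     for y, line in enumerate(raw):
--         clean_raw_line = ""
--         for x, cell in enumerate(line):
--             if (y, x) in loop:
--                 if cell == "S":
--                     clean_raw_line += "7"
--                 else:
--                     clean_raw_line += cell
--             else:
--                 clean_raw_line += "."
--         clean_raw.append(clean_raw_line)
--     return clean_raw
-- ===== SOURCE B (Python) =====
-- def clean_raw(raw, loop):
--     grid = [["."] * len(line) for line in raw]
--     for y, x in loop: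
--         if 0 <= y < len(raw) and 0 <= x < len(raw[y]):
--             cell = raw[y][x]
--             grid[y][x] = "7" if cell == "S" else cell
--     return ["".join(row) for row in grid]
-- ===== Notes on version B (the rewrite author's own statement) =====
-- stated objective: alternative
-- what changed: Instead of testing (y,x) membership in the loop list for every grid cell, B builds all-dot rows up front and scatters only the loop coordinates (bounds-checked) into the grid, then joins each row.
import Mathlib
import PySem

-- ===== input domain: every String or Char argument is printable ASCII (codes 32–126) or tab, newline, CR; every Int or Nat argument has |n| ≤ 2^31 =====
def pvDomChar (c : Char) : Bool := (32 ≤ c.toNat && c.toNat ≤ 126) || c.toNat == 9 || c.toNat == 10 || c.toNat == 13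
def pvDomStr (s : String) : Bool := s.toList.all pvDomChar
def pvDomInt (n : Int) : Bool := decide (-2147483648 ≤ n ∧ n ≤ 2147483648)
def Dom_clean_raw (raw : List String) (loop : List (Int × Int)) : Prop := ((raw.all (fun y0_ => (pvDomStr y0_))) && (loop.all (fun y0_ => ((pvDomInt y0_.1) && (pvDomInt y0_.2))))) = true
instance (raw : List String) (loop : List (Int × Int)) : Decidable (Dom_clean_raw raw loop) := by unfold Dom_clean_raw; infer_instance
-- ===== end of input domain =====

-- B rebuilds the grid as all-dots rows and scatters the loop cells into it
-- (default-then-scatter instead of a per-cell membership scan); objective: alternative.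
-- ===== PORT A =====
def clean_raw (raw : List String) (loop : List (Int × Int)) : List String :=
  (PySem.List.enumerate raw).foldl (fun acc p =>
    let y := p.1
    let line := p.2
    let row := (PySem.List.enumerate line.toList).foldl (fun s q =>
      if (y, q.1) ∈ loop then
        if q.2 = 'S' then s ++ ['7'] else s ++ [q.2]
      else s ++ ['.']) ([] : List Char)
    acc ++ [String.mk row]) []

-- ===== PORT B =====
def scatStep (raw : List String) (g : List (List Char)) (p : Int × Int) : List (List Char) :=
  if 0 ≤ p.1 ∧ p.1 < (raw.length : Int) ∧ 0 ≤ p.2 ∧ p.2 < ((raw[p.1.toNat]!).toList.length : Int) then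
    let cell := (raw[p.1.toNat]!).toList[p.2.toNat]!
    g.set p.1.toNat ((g[p.1.toNat]!).set p.2.toNat (if cell = 'S' then '7' else cell))
  else g

def clean_raw_alt (raw : List String) (loop : List (Int × Int)) : List String :=
  let grid0 : List (List Char) := raw.map (fun line => List.replicate line.toList.length '.')
  let grid := loop.foldl (scatStep raw) grid0
  grid.map (fun row => String.mk row)

-- ===== PRECONDITION & SPEC =====
def Spec_clean_raw (raw : List String) (loop : List (Int × Int)) (out : List String) : Prop := out = clean_raw_alt raw loop
instance (raw : List String) (loop : List (Int × Int)) (out : List String) : Decidable (Spec_clean_raw raw loop out) := by unfold Spec_clean_raw; infer_instance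

-- ===== CLAIM (what is proved, stated in full; the proofs are below) =====
def Claim_equal_clean_raw : Prop := ∀ (raw : List String) (loop : List (Int × Int)), Dom_clean_raw raw loop → Spec_clean_raw raw loop (clean_raw raw loop)


-- ===== LEMMAS AND PROOFS =====

def trS (c : Char) : Char := if c = 'S' then '7' else c

theorem rowA_eq (loop : List (Int × Int)) (y : Int) (line : List Char) :
    (PySem.List.enumerate line).foldl (fun s q =>
      if (y, q.1) ∈ loop then
        if q.2 = 'S' then s ++ ['7'] else s ++ [q.2]
      else s ++ ['.']) ([] : List Char)
    = (PySem.List.enumerate line).map (fun q => if (y, q.1) ∈ loop then trS q.2 else '.') := by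
  have hf : (fun (s : List Char) (q : Int × Char) =>
      if (y, q.1) ∈ loop then
        if q.2 = 'S' then s ++ ['7'] else s ++ [q.2]
      else s ++ ['.'])
      = fun s q => s ++ [if (y, q.1) ∈ loop then trS q.2 else '.'] := by
    funext s q
    by_cases h : (y, q.1) ∈ loop <;> by_cases h2 : q.2 = 'S' <;> simp [trS, h, h2]
  rw [hf, PySem.List.foldl_append_singleton_eq_map]
  simp

theorem clean_raw_eq (raw : List String) (loop : List (Int × Int)) :
    clean_raw raw loop = (PySem.List.enumerate raw).map (fun p =>
      String.mk ((PySem.List.enumerate p.2.toList).map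
        (fun q => if (p.1, q.1) ∈ loop then trS q.2 else '.'))) := by
  unfold clean_raw
  rw [show (fun (acc : List String) (p : Int × String) =>
      acc ++ [String.mk ((PySem.List.enumerate p.2.toList).foldl (fun s q =>
        if (p.1, q.1) ∈ loop then
          if q.2 = 'S' then s ++ ['7'] else s ++ [q.2]
        else s ++ ['.']) ([] : List Char))])
      = fun acc p => acc ++ [String.mk ((PySem.List.enumerate p.2.toList).map
        (fun q => if (p.1, q.1) ∈ loop then trS q.2 else '.'))] from by
    funext acc p; rw [rowA_eq]]
  rw [PySem.List.foldl_append_singleton_eq_map]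
  simp

theorem scatStep_length (raw : List String) (g : List (List Char)) (p : Int × Int) :
    (scatStep raw g p).length = g.length := by
  unfold scatStep; split <;> simp

theorem scatStep_rowlen (raw : List String) (g : List (List Char)) (p : Int × Int) (y : Nat) :
    ((scatStep raw g p)[y]?.getD []).length = (g[y]?.getD []).length := by
  unfold scatStep
  split
  · rw [List.getElem?_set]
    split
    · rename_i hy
      subst hy
      split
      · rename_i hlt
        simp [List.getElem!_eq_getElem?_getD]; rfl
      · rename_i hge
        rw [List.getElem?_eq_none (by omega)]
    · rfl
  · rfl

theorem foldl_scat_length (raw : List String) (loop : List (Int × Int)) (g : List (List Char)) :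
    (loop.foldl (scatStep raw) g).length = g.length := by
  induction loop generalizing g with
  | nil => rfl
  | cons p rest ih => simp only [List.foldl_cons]; rw [ih, scatStep_length]

theorem foldl_scat_rowlen (raw : List String) (loop : List (Int × Int)) (g : List (List Char)) (y : Nat) :
    ((loop.foldl (scatStep raw) g)[y]?.getD []).length = (g[y]?.getD []).length := by
  induction loop generalizing g with
  | nil => rfl
  | cons p rest ih => simp only [List.foldl_cons]; rw [ih, scatStep_rowlen]

theorem scatter_cell (raw : List String) (loop : List (Int × Int)) :
    ∀ (g : List (List Char)) (y x : Nat),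
    g.length = raw.length →
    (∀ i : Nat, (g[i]?.getD []).length = ((raw[i]?.getD "").toList).length) →
    y < raw.length → x < ((raw[y]?.getD "").toList).length →
    (((loop.foldl (scatStep raw) g)[y]?.getD [])[x]?.getD '.')
      = if ((y : Int), (x : Int)) ∈ loop then trS (((raw[y]?.getD "").toList)[x]?.getD '.')
        else ((g[y]?.getD [])[x]?.getD '.') := by
  induction loop with
  | nil => intro g y x _ _ _ _; simp
  | cons p rest ih =>
    intro g y x hlen hrow hy hx
    simp only [List.foldl_cons]
    rw [ih (scatStep raw g p) y x (by rw [scatStep_length]; exact hlen)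
        (fun i => by rw [scatStep_rowlen]; exact hrow i) hy hx]
    by_cases hp : p = ((y : Int), (x : Int))
    · -- the scatter wrote exactly this cell
      have hcond : 0 ≤ p.1 ∧ p.1 < (raw.length : Int) ∧ 0 ≤ p.2 ∧
          p.2 < ((raw[p.1.toNat]!).toList.length : Int) := by
        subst hp
        refine ⟨by omega, by omega, by omega, ?_⟩
        simp only [Int.toNat_natCast, List.getElem!_eq_getElem?_getD]
        have hd : (default : String) = "" := rfl
        rw [hd]
        omega
      have hg' : ((scatStep raw g p)[y]?.getD [])[x]?.getD '.'
          = trS (((raw[y]?.getD "").toList)[x]?.getD '.') := by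
        unfold scatStep
        rw [if_pos hcond]
        subst hp
        simp only [Int.toNat_natCast]
        rw [List.getElem?_set_self (by omega)]
        simp only [Option.getD_some, List.getElem!_eq_getElem?_getD]
        rw [List.getElem?_set_self (by rw [show ((g[y]?.getD default : List Char)) = g[y]?.getD [] from rfl, hrow y]; exact hx)]
        simp only [Option.getD_some]
        have hd : (default : String) = "" := rfl
        rw [hd, List.getElem?_eq_getElem hx]
        simp [trS]
      rw [hg']
      have hmem : ((y : Int), (x : Int)) ∈ p :: rest := by rw [hp]; exact List.mem_cons_self
      by_cases hr : ((y : Int), (x : Int)) ∈ rest <;> simp [hr, hmem]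
    · -- the scatter left this cell unchanged
      have hg' : ((scatStep raw g p)[y]?.getD [])[x]?.getD '.'
          = ((g[y]?.getD [])[x]?.getD '.') := by
        unfold scatStep
        split
        · rename_i hc
          by_cases hi : p.1.toNat = y
          · have hj : p.2.toNat ≠ x := by
              intro hj
              exact hp (by
                have : p.1 = (y : Int) := by omega
                have : p.2 = (x : Int) := by omega
                exact Prod.ext (by omega) (by omega))
            rw [hi, List.getElem?_set_self (by omega)]
            simp only [Option.getD_some]
            rw [List.getElem?_set_ne hj, List.getElem!_eq_getElem?_getD]
            rfl
          · rw [List.getElem?_set_ne hi]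
        · rfl
      rw [hg']
      have hiff : (((y : Int), (x : Int)) ∈ p :: rest) ↔ (((y : Int), (x : Int)) ∈ rest) := by
        constructor
        · intro h
          rcases List.mem_cons.mp h with h1 | h1
          · exact absurd h1.symm hp
          · exact h1
        · intro h
          exact List.mem_cons_of_mem _ h
      rw [if_congr hiff rfl rfl]

theorem grid0_rowlen (raw : List String) (i : Nat) :
    ((raw.map (fun line => List.replicate line.toList.length '.'))[i]?.getD []).length
      = ((raw[i]?.getD "").toList).length := by
  by_cases hi : i < raw.length
  · rw [List.getElem?_map, List.getElem?_eq_getElem hi]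
    simp
  · rw [List.getElem?_eq_none (by simp; omega), List.getElem?_eq_none (by omega)]
    rfl

theorem clean_raw_spec : Claim_equal_clean_raw := by
  intro raw loop _dom
  unfold Spec_clean_raw clean_raw_alt
  rw [clean_raw_eq]
  simp only []
  have hglen : (loop.foldl (scatStep raw)
      (raw.map (fun line => List.replicate line.toList.length '.'))).length = raw.length := by
    rw [foldl_scat_length]; simp
  apply List.ext_getElem?
  intro y
  rw [List.getElem?_map, List.getElem?_map, PySem.List.getElem?_enumerate]
  by_cases hy : y < raw.length
  · have hy2 : y < (loop.foldl (scatStep raw)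
        (raw.map (fun line => List.replicate line.toList.length '.'))).length := by omega
    rw [List.getElem?_eq_getElem hy, List.getElem?_eq_getElem hy2]
    simp only [Option.map_some]
    congr 1
    apply congrArg
    -- char-list equality of row y
    have hrowlen : ((loop.foldl (scatStep raw)
        (raw.map (fun line => List.replicate line.toList.length '.')))[y]?.getD []).length
        = raw[y].toList.length := by
      rw [foldl_scat_rowlen, grid0_rowlen, List.getElem?_eq_getElem hy]
      rfl
    have hEq : (loop.foldl (scatStep raw)
        (raw.map (fun line => List.replicate line.toList.length '.')))[y]?.getD []
        = (loop.foldl (scatStep raw)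
        (raw.map (fun line => List.replicate line.toList.length '.')))[y] := by
      rw [List.getElem?_eq_getElem hy2]
      rfl
    rw [hEq] at hrowlen
    apply List.ext_getElem?
    intro x
    rw [List.getElem?_map, PySem.List.getElem?_enumerate]
    by_cases hx : x < raw[y].toList.length
    · have hx2 : x < ((loop.foldl (scatStep raw)
          (raw.map (fun line => List.replicate line.toList.length '.')))[y]).length := by omega
      have hcell := scatter_cell raw loop
        (raw.map (fun line => List.replicate line.toList.length '.')) y x
        (by simp) (grid0_rowlen raw) hy
        (by rw [List.getElem?_eq_getElem hy]; exact hx)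
      simp only [List.getElem?_eq_getElem hy, Option.getD_some] at hcell
      rw [hEq, List.getElem?_eq_getElem hx2, Option.getD_some,
        List.getElem?_eq_getElem hx, Option.getD_some, List.getElem?_map,
        List.getElem?_eq_getElem hy, Option.map_some, Option.getD_some] at hcell
      simp only [List.getElem?_replicate, hx, if_true, Option.getD_some] at hcell
      rw [List.getElem?_eq_getElem hx, List.getElem?_eq_getElem hx2]
      simp only [Option.map_some, Option.some.injEq, Int.zero_add]
      exact hcell.symm
    · rw [List.getElem?_eq_none (by omega), List.getElem?_eq_none (by omega)]
      rfl
  · rw [List.getElem?_eq_none (by omega), List.getElem?_eq_none (by omega)]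
    rfl
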